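-- pv_equiv track=rewrite | github.com/JAdamHub/SkillScopeJob | profile_job_matcher.py | _calculate_experience_match_bonus
-- ===== SOURCE A (Python) =====
-- from typing import Dict, List, Optional
--
-- def _calculate_experience_match_bonus(job: Dict, total_experience: str) -> int:
--     """Calculate bonus based on experience level matching"""
--     title = job.get('title', '').lower()
--     description = job.get('description', '').lower()
--
--     # Experience level indicators
--     senior_indicators = ['senior', 'lead', 'principal', 'architect', 'manager', 'director']
--     junior_indicators = ['junior', 'graduate', 'entry', 'trainee', 'intern', 'assistant']
--     mid_indicators = ['developer', 'engineer', 'analyst', 'specialist', 'consultant']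
--
--     # Check job seniority level
--     is_senior = any(indicator in title for indicator in senior_indicators)
--     is_junior = any(indicator in title for indicator in junior_indicators)
--     is_mid = not is_senior and not is_junior and any(indicator in title for indicator in mid_indicators)
--
--     # Match with user experience
--     if total_experience in ['None', '0-1 year']:
--         if is_junior:
--             return 15
--         elif is_mid:
--             return 5
--         else:
--             return -5
--     elif total_experience in ['1-3 years', '3-5 years']:
--         if is_mid:
--             return 15
--         elif is_junior:
--             return 10
--         elif is_senior:
--             return 0
--     elif total_experience in ['5-10 years', '10-15 years', '15+ years']:
--         if is_senior:
--             return 15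
--         elif is_mid:
--             return 10
--         else:
--             return 5
--
--     return 0
-- ===== SOURCE B (Python) =====
-- # Table-driven re-implementation: per-experience-group ordered (flag, bonus) rules + default,
-- # looked up once, instead of A's nested if/elif chains.
--
-- _RULES = {
--     'None':        ([('junior', 15), ('mid', 5)], -5),
--     '0-1 year':    ([('junior', 15), ('mid', 5)], -5),
--     '1-3 years':   ([('mid', 15), ('junior', 10), ('senior', 0)], 0),
--     '3-5 years':   ([('mid', 15), ('junior', 10), ('senior', 0)], 0),
--     '5-10 years':  ([('senior', 15), ('mid', 10)], 5),
--     '10-15 years': ([('senior', 15), ('mid', 10)], 5),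
--     '15+ years':   ([('senior', 15), ('mid', 10)], 5),
-- }
--
-- _SENIOR = ['senior', 'lead', 'principal', 'architect', 'manager', 'director']
-- _JUNIOR = ['junior', 'graduate', 'entry', 'trainee', 'intern', 'assistant']
-- _MID = ['developer', 'engineer', 'analyst', 'specialist', 'consultant']
--
--
-- def _calculate_experience_match_bonus(job, total_experience):
--     title = job.get('title', '').lower()
--     is_senior = any(w in title for w in _SENIOR)
--     is_junior = any(w in title for w in _JUNIOR)
--     flags = {
--         'senior': is_senior,
--         'junior': is_junior,
--         'mid': not is_senior and not is_junior and any(w in title for w in _MID),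
--     }
--     rules, default = _RULES.get(total_experience, ([], 0))
--     for name, bonus in rules:
--         if flags[name]:
--             return bonus
--     return default
-- ===== Notes on version B (the rewrite author's own statement) =====
-- stated objective: alternative
-- what changed: Replaced the nested if/elif chains with a data-driven dispatch: a table mapping each experience group to an ordered list of (flag, bonus) rules plus a group default, looked up once and scanned for the first true flag.
import Mathlib
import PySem

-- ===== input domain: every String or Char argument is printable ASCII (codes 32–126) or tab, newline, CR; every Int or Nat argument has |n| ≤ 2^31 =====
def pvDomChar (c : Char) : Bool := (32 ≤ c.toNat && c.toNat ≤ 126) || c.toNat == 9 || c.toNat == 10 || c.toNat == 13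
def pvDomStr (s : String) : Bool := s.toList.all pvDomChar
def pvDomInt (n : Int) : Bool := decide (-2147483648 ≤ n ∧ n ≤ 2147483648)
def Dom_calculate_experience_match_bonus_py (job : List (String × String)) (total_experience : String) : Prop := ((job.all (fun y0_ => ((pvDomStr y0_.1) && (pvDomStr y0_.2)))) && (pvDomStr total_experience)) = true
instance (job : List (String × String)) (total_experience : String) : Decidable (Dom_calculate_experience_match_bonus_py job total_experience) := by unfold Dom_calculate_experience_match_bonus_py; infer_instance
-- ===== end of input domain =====

-- B replaces A's nested if/elif chains with a rules table (group -> ordered (flag,bonus) list + default); alternative decomposition, same cost.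

-- ===== PORT A =====
def pvSeniorIndicators : List String := ["senior", "lead", "principal", "architect", "manager", "director"]
def pvJuniorIndicators : List String := ["junior", "graduate", "entry", "trainee", "intern", "assistant"]
def pvMidIndicators : List String := ["developer", "engineer", "analyst", "specialist", "consultant"]

def calculate_experience_match_bonus_py (job : List (String × String)) (total_experience : String) : Int :=
  let title := PySem.Str.lower (PySem.Dict.getD (PySem.Dict.mk job) "title" "")
  let _description := PySem.Str.lower (PySem.Dict.getD (PySem.Dict.mk job) "description" "")
  let is_senior := pvSeniorIndicators.any (fun ind => PySem.Str.isIn ind title)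
  let is_junior := pvJuniorIndicators.any (fun ind => PySem.Str.isIn ind title)
  let is_mid := !is_senior && !is_junior && pvMidIndicators.any (fun ind => PySem.Str.isIn ind title)
  if total_experience ∈ ["None", "0-1 year"] then
    if is_junior then 15 else if is_mid then 5 else -5
  else if total_experience ∈ ["1-3 years", "3-5 years"] then
    -- fall-through to the final 'return 0' when no flag fires
    if is_mid then 15 else if is_junior then 10 else if is_senior then 0 else 0
  else if total_experience ∈ ["5-10 years", "10-15 years", "15+ years"] then
    if is_senior then 15 else if is_mid then 10 else 5
  else 0

-- ===== PORT B =====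
def pvRulesTable : PySem.Dict String (List (String × Int) × Int) := PySem.Dict.mk
  [ ("None",        ([("junior", 15), ("mid", 5)], -5))
  , ("0-1 year",    ([("junior", 15), ("mid", 5)], -5))
  , ("1-3 years",   ([("mid", 15), ("junior", 10), ("senior", 0)], 0))
  , ("3-5 years",   ([("mid", 15), ("junior", 10), ("senior", 0)], 0))
  , ("5-10 years",  ([("senior", 15), ("mid", 10)], 5))
  , ("10-15 years", ([("senior", 15), ("mid", 10)], 5))
  , ("15+ years",   ([("senior", 15), ("mid", 10)], 5)) ]

-- the 'for name, bonus in rules: if flags[name]: return bonus / return default' loop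
def pvScanRules (flags : PySem.Dict String Bool) : List (String × Int) → Int → Int
  | [], default => default
  | (name, bonus) :: rest, default =>
      if PySem.Dict.getD flags name false then bonus else pvScanRules flags rest default

def calculate_experience_match_bonus_py_alt (job : List (String × String)) (total_experience : String) : Int :=
  let title := PySem.Str.lower (PySem.Dict.getD (PySem.Dict.mk job) "title" "")
  let is_senior := pvSeniorIndicators.any (fun w => PySem.Str.isIn w title)
  let is_junior := pvJuniorIndicators.any (fun w => PySem.Str.isIn w title)
  let flags := PySem.Dict.mk
    [ ("senior", is_senior)
    , ("junior", is_junior)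
    , ("mid", !is_senior && !is_junior && pvMidIndicators.any (fun w => PySem.Str.isIn w title)) ]
  let rd := PySem.Dict.getD pvRulesTable total_experience ([], 0)
  pvScanRules flags rd.1 rd.2

-- ===== PRECONDITION & SPEC =====
def Spec_calculate_experience_match_bonus_py (job : List (String × String)) (total_experience : String) (out : Int) : Prop := out = calculate_experience_match_bonus_py_alt job total_experience
instance (job : List (String × String)) (total_experience : String) (out : Int) : Decidable (Spec_calculate_experience_match_bonus_py job total_experience out) := by unfold Spec_calculate_experience_match_bonus_py; infer_instance

-- ===== CLAIM (what is proved, stated in full; the proofs are below) =====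
def Claim_equal_calculate_experience_match_bonus_py : Prop := ∀ (job : List (String × String)) (total_experience : String), Dom_calculate_experience_match_bonus_py job total_experience → Spec_calculate_experience_match_bonus_py job total_experience (calculate_experience_match_bonus_py job total_experience)

-- ===== LEMMAS AND PROOFS =====

-- Both if-trees, abstracted over the experience string and the three flag booleans, agree.
set_option maxHeartbeats 2000000 in
lemma pv_core_eq (te : String) (s j m : Bool) :
    (if te ∈ ["None", "0-1 year"] then
      (if j then (15 : Int) else if m then 5 else -5)
    else if te ∈ ["1-3 years", "3-5 years"] then
      (if m then 15 else if j then 10 else if s then 0 else 0)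
    else if te ∈ ["5-10 years", "10-15 years", "15+ years"] then
      (if s then 15 else if m then 10 else 5)
    else 0)
    = pvScanRules (PySem.Dict.mk [("senior", s), ("junior", j), ("mid", m)])
        (PySem.Dict.getD pvRulesTable te ([], 0)).1
        (PySem.Dict.getD pvRulesTable te ([], 0)).2 := by
  by_cases h1 : te = "None" <;> by_cases h2 : te = "0-1 year" <;>
    by_cases h3 : te = "1-3 years" <;> by_cases h4 : te = "3-5 years" <;>
    by_cases h5 : te = "5-10 years" <;> by_cases h6 : te = "10-15 years" <;>
    by_cases h7 : te = "15+ years" <;>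
    first
    | (subst_vars; cases s <;> cases j <;> cases m <;> rfl)
    | · have n1 : ("None" == te) = false := beq_eq_false_iff_ne.mpr (Ne.symm h1)
        have n2 : ("0-1 year" == te) = false := beq_eq_false_iff_ne.mpr (Ne.symm h2)
        have n3 : ("1-3 years" == te) = false := beq_eq_false_iff_ne.mpr (Ne.symm h3)
        have n4 : ("3-5 years" == te) = false := beq_eq_false_iff_ne.mpr (Ne.symm h4)
        have n5 : ("5-10 years" == te) = false := beq_eq_false_iff_ne.mpr (Ne.symm h5)
        have n6 : ("10-15 years" == te) = false := beq_eq_false_iff_ne.mpr (Ne.symm h6)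
        have n7 : ("15+ years" == te) = false := beq_eq_false_iff_ne.mpr (Ne.symm h7)
        simp [pvRulesTable, pvScanRules, PySem.Dict.getD, PySem.Dict.get?,
          n1, n2, n3, n4, n5, n6, n7, h1, h2, h3, h4, h5, h6, h7]

-- ===== VERDICT (by name: the statement is the Claim_ definition above) =====
theorem calculate_experience_match_bonus_py_spec : Claim_equal_calculate_experience_match_bonus_py := by
  intro job te _
  unfold Spec_calculate_experience_match_bonus_py
  unfold calculate_experience_match_bonus_py calculate_experience_match_bonus_py_alt
  exact pv_core_eq te _ _ _
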